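-- pv_equiv track=rewrite | github.com/Nick648/Math_Arrays_etc_Python | Matrices_sem_1/matrices.py | mat43
-- ===== SOURCE A (Python) =====
-- def mat2(a):
-- 	S=a[0][0]*a[1][1]-a[0][1]*a[1][0]
-- 	return S
--
-- def mat3(a):
-- 	S=0
-- 	for j in range(3):
-- 		S+=a[0][j]*((-1)**(1+j+1))*mat32(a,j)
-- 	return S
--
-- def mat32(a,j):
-- 	c=[[]*2]*2
-- 	for i in range(1,3):
-- 		b=[]
-- 		for g in range(3):
-- 			if g!=j:
-- 				b.append(a[i][g])
-- 		c[i-1]=b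
-- 	return mat2(c)
--
-- def mat43(a,j):
-- 	c=[[]*3]*3
-- 	for i in range(1,4):
-- 		b=[]
-- 		for g in range(4):
-- 			if g!=j:
-- 				b.append(a[i][g])
-- 		c[i-1]=b
-- 	return mat3(c)
-- ===== SOURCE B (Python) =====
-- def mat43(a, j):
--     m = [[a[i][g] for g in range(4) if g != j] for i in (1, 2, 3)]
--     return (m[0][0] * (m[1][1] * m[2][2] - m[1][2] * m[2][1])
--           - m[0][1] * (m[1][0] * m[2][2] - m[1][2] * m[2][0])
--           + m[0][2] * (m[1][0] * m[2][1] - m[1][1] * m[2][0]))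
-- ===== Notes on version B (the rewrite author's own statement) =====
-- stated objective: simpler
-- what changed: B extracts the 3x3 minor with one comprehension and evaluates its determinant by the closed-form cofactor formula, replacing A's mat3/mat32/mat2 recursive cofactor expansion and its mutated temporary list.
import Mathlib
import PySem

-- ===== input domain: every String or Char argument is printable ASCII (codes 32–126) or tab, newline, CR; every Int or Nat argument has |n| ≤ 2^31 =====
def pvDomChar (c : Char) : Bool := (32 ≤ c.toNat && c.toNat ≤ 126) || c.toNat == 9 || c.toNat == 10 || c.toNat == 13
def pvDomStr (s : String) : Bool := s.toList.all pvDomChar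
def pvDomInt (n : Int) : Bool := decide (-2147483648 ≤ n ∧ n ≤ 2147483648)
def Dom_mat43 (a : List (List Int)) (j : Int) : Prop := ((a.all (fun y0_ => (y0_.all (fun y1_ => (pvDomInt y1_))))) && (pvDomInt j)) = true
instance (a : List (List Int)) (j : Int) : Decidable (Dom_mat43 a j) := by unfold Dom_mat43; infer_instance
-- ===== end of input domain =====

-- B drops A's mat3/mat32/mat2 recursive cofactor expansion and computes the 3×3 minor's
-- determinant by the closed-form formula: 'simpler', not faster (both are constant-time).

-- shared primitive accessors (a[i] and xs[g]; indices reached under Pre_ are in range,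
-- so the .getD default is never used on admitted inputs)
def pvRow (a : List (List Int)) (i : Int) : List Int := (PySem.List.pyGet? a i).getD []
def pvAt (xs : List Int) (i : Int) : Int := (PySem.List.pyGet? xs i).getD 0

-- ===== PORT A =====
def mat2 (a : List (List Int)) : Int :=
  pvAt (pvRow a 0) 0 * pvAt (pvRow a 1) 1 - pvAt (pvRow a 0) 1 * pvAt (pvRow a 1) 0

def mat32 (a : List (List Int)) (j : Int) : Int :=
  -- c = [[]*2]*2; for i in range(1,3): b = cols 0..2 of a[i] except j; c[i-1] = b
  -- (i-1 is 0 or 1, nonnegative, so Python's c[i-1]=b is List.set (i-1).toNat)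
  let c := (PySem.List.pyRange 1 3 1).foldl (fun c i =>
    let b := (PySem.List.pyRange 0 3 1).foldl (fun b g =>
      if g ≠ j then b ++ [pvAt (pvRow a i) g] else b) []
    c.set (i - 1).toNat b) [[], []]
  mat2 c

def mat3 (a : List (List Int)) : Int :=
  (PySem.List.pyRange 0 3 1).foldl (fun S j =>
    S + pvAt (pvRow a 0) j * ((-1 : Int) ^ (1 + j + 1).toNat) * mat32 a j) 0

def mat43 (a : List (List Int)) (j : Int) : Int :=
  let c := (PySem.List.pyRange 1 4 1).foldl (fun c i =>
    let b := (PySem.List.pyRange 0 4 1).foldl (fun b g =>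
      if g ≠ j then b ++ [pvAt (pvRow a i) g] else b) []
    c.set (i - 1).toNat b) [[], [], []]
  mat3 c

-- ===== PORT B =====
def mat43_alt (a : List (List Int)) (j : Int) : Int :=
  let m := ([1, 2, 3] : List Int).map (fun i =>
    ((PySem.List.pyRange 0 4 1).filter (fun g => g ≠ j)).map (fun g => pvAt (pvRow a i) g))
  pvAt (pvRow m 0) 0 * (pvAt (pvRow m 1) 1 * pvAt (pvRow m 2) 2 - pvAt (pvRow m 1) 2 * pvAt (pvRow m 2) 1)
  - pvAt (pvRow m 0) 1 * (pvAt (pvRow m 1) 0 * pvAt (pvRow m 2) 2 - pvAt (pvRow m 1) 2 * pvAt (pvRow m 2) 0)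
  + pvAt (pvRow m 0) 2 * (pvAt (pvRow m 1) 0 * pvAt (pvRow m 2) 1 - pvAt (pvRow m 1) 1 * pvAt (pvRow m 2) 0)

-- ===== PRECONDITION & SPEC =====
-- A raises IndexError unless a has at least 4 rows and rows 1..3 each have at least 4 entries
def Pre_mat43 (a : List (List Int)) (j : Int) : Prop :=
  4 ≤ a.length ∧ ∀ i, i ∈ ([1, 2, 3] : List Nat) → 4 ≤ (a.getD i []).length
instance (a : List (List Int)) (j : Int) : Decidable (Pre_mat43 a j) := by unfold Pre_mat43; infer_instance

def pvWitness_mat43 : List (List Int) × Int :=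
  ([[1, 2, 3, 4], [5, 6, 7, 8], [9, 1, 2, 3], [4, 5, 6, 7]], 1)

def Spec_mat43 (a : List (List Int)) (j : Int) (out : Int) : Prop := out = mat43_alt a j
instance (a : List (List Int)) (j : Int) (out : Int) : Decidable (Spec_mat43 a j out) := by unfold Spec_mat43; infer_instance

-- ===== CLAIM (what is proved, stated in full; the proofs are below) =====
def Claim_equal_mat43 : Prop := ∀ (a : List (List Int)) (j : Int), Dom_mat43 a j → Pre_mat43 a j → Spec_mat43 a j (mat43 a j)

-- ===== LEMMAS AND PROOFS =====
theorem pyGetD0 {α : Type} (d x0 : α) (xs : List α) : (PySem.List.pyGet? (x0::xs) 0).getD d = x0 := by simp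
theorem pyGetD1 {α : Type} (d x0 x1 : α) (xs : List α) : (PySem.List.pyGet? (x0::x1::xs) 1).getD d = x1 := by simp [PySem.List.pyGet?_of_nonneg]
theorem pyGetD2 {α : Type} (d x0 x1 x2 : α) (xs : List α) : (PySem.List.pyGet? (x0::x1::x2::xs) 2).getD d = x2 := by simp [PySem.List.pyGet?_of_nonneg]
theorem pyGetD3 {α : Type} (d x0 x1 x2 x3 : α) (xs : List α) : (PySem.List.pyGet? (x0::x1::x2::x3::xs) 3).getD d = x3 := by simp [PySem.List.pyGet?_of_nonneg]
theorem pvRange03 : PySem.List.pyRange 0 3 1 = [0, 1, 2] := by decide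
theorem pvRange13 : PySem.List.pyRange 1 3 1 = [1, 2] := by decide
theorem pvRange04 : PySem.List.pyRange 0 4 1 = [0, 1, 2, 3] := by decide
theorem pvRange14 : PySem.List.pyRange 1 4 1 = [1, 2, 3] := by decide

-- ===== VERDICT (by name: the statement is the Claim_ definition above) =====
theorem mat43_spec : Claim_equal_mat43 := by
  intro a j _ hpre
  obtain ⟨hlen, hrows⟩ := hpre
  match a, hlen with
  | r0 :: r1 :: r2 :: r3 :: rest, _ =>
  have h1 := hrows 1 (by simp)
  have h2 := hrows 2 (by simp)
  have h3 := hrows 3 (by simp)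
  simp only [List.getD, List.getElem?_cons_succ, List.getElem?_cons_zero, Option.getD_some] at h1 h2 h3
  match r1, h1 with
  | x0 :: x1 :: x2 :: x3 :: xr, _ =>
  match r2, h2 with
  | y0 :: y1 :: y2 :: y3 :: yr, _ =>
  match r3, h3 with
  | z0 :: z1 :: z2 :: z3 :: zr, _ =>
  unfold Spec_mat43
  by_cases hj0 : j = 0
  case pos =>
    subst hj0
    simp [mat43, mat43_alt, mat3, mat32, mat2, pvAt, pvRow, pvRange03, pvRange13,
      pvRange04, pvRange14, pyGetD0, pyGetD1, pyGetD2, pyGetD3, List.foldl, List.set]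
    ring
  case neg =>
  by_cases hj1 : j = 1
  case pos =>
    subst hj1
    simp [mat43, mat43_alt, mat3, mat32, mat2, pvAt, pvRow, pvRange03, pvRange13,
      pvRange04, pvRange14, pyGetD0, pyGetD1, pyGetD2, pyGetD3, List.foldl, List.set]
    ring
  case neg =>
  by_cases hj2 : j = 2
  case pos =>
    subst hj2
    simp [mat43, mat43_alt, mat3, mat32, mat2, pvAt, pvRow, pvRange03, pvRange13,
      pvRange04, pvRange14, pyGetD0, pyGetD1, pyGetD2, pyGetD3, List.foldl, List.set]
    ring
  case neg =>
  by_cases hj3 : j = 3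
  case pos =>
    subst hj3
    simp [mat43, mat43_alt, mat3, mat32, mat2, pvAt, pvRow, pvRange03, pvRange13,
      pvRange04, pvRange14, pyGetD0, pyGetD1, pyGetD2, pyGetD3, List.foldl, List.set]
    ring
  case neg =>
    have h0' : (0 : Int) ≠ j := fun h => hj0 h.symm
    have h1' : (1 : Int) ≠ j := fun h => hj1 h.symm
    have h2' : (2 : Int) ≠ j := fun h => hj2 h.symm
    have h3' : (3 : Int) ≠ j := fun h => hj3 h.symm
    simp [mat43, mat43_alt, mat3, mat32, mat2, pvAt, pvRow, pvRange03, pvRange13,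
      pvRange04, pvRange14, pyGetD0, pyGetD1, pyGetD2, pyGetD3, List.foldl, List.set,
      h0', h1', h2', h3']
    ring
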